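-- pv_equiv track=rewrite | github.com/get-proofpilot/proofpilot-agent-hub | backend/seo_executor.py | _extract_next_blogs
-- ===== SOURCE A (Python) =====
-- _PRIORITY_ORDER = {'HIGH': 0, 'MED': 1, 'LOW': 2}
--
-- def _extract_next_blogs(roadmap_data: dict, limit: int = 5) -> list[dict]:
--     """Extract next blog posts from roadmap blogs_pipeline, sorted by priority."""
--     if not roadmap_data:
--         return []
--
--     pipeline = roadmap_data.get('blogs_pipeline')
--     if not pipeline or not isinstance(pipeline, list):
--         return []
--
--     needed = []
--     for entry in pipeline:
--         if not isinstance(entry, dict):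
--             continue
--         status = str(entry.get('status', 'needed')).lower()
--         if status in ('live', 'done', 'published', 'skipped'):
--             continue
--         needed.append(entry)
--
--     needed.sort(key=lambda p: _PRIORITY_ORDER.get(str(p.get('priority', 'LOW')).upper(), 2))
--     return needed[:limit]
-- ===== SOURCE B (Python) =====
-- _PRIORITY_ORDER = {'HIGH': 0, 'MED': 1, 'LOW': 2}
--
-- def _extract_next_blogs(roadmap_data: dict, limit: int = 5) -> list[dict]:
--     """Single-pass bucket partition over the 3 priority levels (stable) instead of sorting."""
--     if not roadmap_data:
--         return []
--
--     pipeline = roadmap_data.get('blogs_pipeline')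
--     if not pipeline or not isinstance(pipeline, list):
--         return []
--
--     high, med, low = [], [], []
--     for entry in pipeline:
--         if not isinstance(entry, dict):
--             continue
--         if str(entry.get('status', 'needed')).lower() in ('live', 'done', 'published', 'skipped'):
--             continue
--         k = _PRIORITY_ORDER.get(str(entry.get('priority', 'LOW')).upper(), 2)
--         if k == 0:
--             high.append(entry)
--         elif k == 1:
--             med.append(entry)
--         else:
--             low.append(entry)
--     return (high + med + low)[:limit]
-- ===== Notes on version B (the rewrite author's own statement) =====
-- stated objective: alternative
-- what changed: Replaces the stable comparison sort over the 3-level priority key by a single-pass stable 3-bucket partition (high/med/low lists appended in order), then takes the first `limit` entries.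
import Mathlib
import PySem

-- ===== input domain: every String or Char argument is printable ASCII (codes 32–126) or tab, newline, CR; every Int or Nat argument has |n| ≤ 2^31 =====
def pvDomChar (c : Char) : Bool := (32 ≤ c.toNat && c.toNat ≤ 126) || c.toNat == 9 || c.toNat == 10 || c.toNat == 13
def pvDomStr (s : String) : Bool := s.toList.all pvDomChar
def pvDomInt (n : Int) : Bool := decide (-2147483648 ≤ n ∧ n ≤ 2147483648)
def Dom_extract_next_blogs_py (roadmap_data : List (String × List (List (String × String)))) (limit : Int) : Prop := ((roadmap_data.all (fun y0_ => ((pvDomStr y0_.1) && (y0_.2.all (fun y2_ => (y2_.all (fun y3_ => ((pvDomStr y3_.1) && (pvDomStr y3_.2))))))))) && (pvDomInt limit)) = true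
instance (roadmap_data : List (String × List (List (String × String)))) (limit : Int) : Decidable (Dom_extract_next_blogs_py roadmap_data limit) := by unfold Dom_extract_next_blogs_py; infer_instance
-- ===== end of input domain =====

-- B replaces the stable sort over the 3 priority levels by a single-pass stable 3-bucket partition; equivalence is about the return value (A sorts its local list in place).

-- ===== PORT A =====
-- shared helpers: both Pythons use the same _PRIORITY_ORDER lookup and status test, transliterated once
-- entry.get(k, dflt) on an association-list dict: first match
def pvDget (entry : List (String × String)) (k dflt : String) : String :=
  ((entry.find? (fun p => p.1 == k)).map (·.2)).getD dflt

-- _PRIORITY_ORDER.get(str(p.get('priority','LOW')).upper(), 2)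
def pvPrioKey (entry : List (String × String)) : Int :=
  ((([("HIGH", (0 : Int)), ("MED", 1), ("LOW", 2)].find? (fun p => p.1 == PySem.Str.upper (pvDget entry "priority" "LOW"))).map (·.2)).getD 2)

-- status in ('live', 'done', 'published', 'skipped')
def pvStatusDone (entry : List (String × String)) : Bool :=
  ["live", "done", "published", "skipped"].contains (PySem.Str.lower (pvDget entry "status" "needed"))

def extract_next_blogs_py (roadmap_data : List (String × List (List (String × String)))) (limit : Int) : List (List (String × String)) :=
  if roadmap_data = [] then []
  else
    match (roadmap_data.find? (fun p => p.1 == "blogs_pipeline")).map (·.2) with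
    | none => []
    | some pipeline =>
      if pipeline = [] then []
      else
        let needed := pipeline.foldl (fun acc entry => if pvStatusDone entry then acc else acc ++ [entry]) []
        PySem.List.slice (PySem.List.sorted needed pvPrioKey false) none (some limit)

-- ===== PORT B =====
def pvBucketStep (b : List (List (String × String)) × List (List (String × String)) × List (List (String × String))) (entry : List (String × String)) : List (List (String × String)) × List (List (String × String)) × List (List (String × String)) :=
  if pvStatusDone entry then b
  else
    let k := pvPrioKey entry
    if k = 0 then (b.1 ++ [entry], b.2.1, b.2.2)
    else if k = 1 then (b.1, b.2.1 ++ [entry], b.2.2)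
    else (b.1, b.2.1, b.2.2 ++ [entry])

def extract_next_blogs_py_alt (roadmap_data : List (String × List (List (String × String)))) (limit : Int) : List (List (String × String)) :=
  if roadmap_data = [] then []
  else
    match (roadmap_data.find? (fun p => p.1 == "blogs_pipeline")).map (·.2) with
    | none => []
    | some pipeline =>
      if pipeline = [] then []
      else
        let b := pipeline.foldl pvBucketStep ([], [], [])
        PySem.List.slice (b.1 ++ b.2.1 ++ b.2.2) none (some limit)

-- ===== PRECONDITION & SPEC =====
def Spec_extract_next_blogs_py (roadmap_data : List (String × List (List (String × String)))) (limit : Int) (out : List (List (String × String))) : Prop := out = extract_next_blogs_py_alt roadmap_data limit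
instance (roadmap_data : List (String × List (List (String × String)))) (limit : Int) (out : List (List (String × String))) : Decidable (Spec_extract_next_blogs_py roadmap_data limit out) := by unfold Spec_extract_next_blogs_py; infer_instance

-- ===== CLAIM (what is proved, stated in full; the proofs are below) =====
def Claim_equal_extract_next_blogs_py : Prop := ∀ (roadmap_data : List (String × List (List (String × String)))) (limit : Int), Dom_extract_next_blogs_py roadmap_data limit → Spec_extract_next_blogs_py roadmap_data limit (extract_next_blogs_py roadmap_data limit)

-- ===== LEMMAS AND PROOFS =====

-- the priority key only takes the values 0, 1, 2
theorem pvPrioKey_cases (entry : List (String × String)) :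
    pvPrioKey entry = 0 ∨ pvPrioKey entry = 1 ∨ pvPrioKey entry = 2 := by
  unfold pvPrioKey
  generalize PySem.Str.upper (pvDget entry "priority" "LOW") = s
  by_cases h1 : ("HIGH" == s) = true <;> by_cases h2 : ("MED" == s) = true <;>
    by_cases h3 : ("LOW" == s) = true <;> simp [List.find?, h1, h2, h3]

theorem pvInsertBy_append_not {α : Type} (before : α → α → Bool) (x : α) (ys zs : List α)
    (h : ∀ y ∈ ys, before x y = false) :
    PySem.List.insertBy before x (ys ++ zs) = ys ++ PySem.List.insertBy before x zs := by
  induction ys with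
  | nil => simp
  | cons y ys ih =>
    simp only [List.cons_append, PySem.List.insertBy, h y (List.mem_cons_self ..)]
    simp [ih (fun a ha => h a (List.mem_cons_of_mem _ ha))]

theorem pvInsertBy_all_before {α : Type} (before : α → α → Bool) (x : α) (ys : List α)
    (h : ∀ y ∈ ys, before x y = true) :
    PySem.List.insertBy before x ys = x :: ys := by
  cases ys with
  | nil => rfl
  | cons y ys => simp [PySem.List.insertBy, h y (List.mem_cons_self ..)]

-- a stable sort by a key taking only the values 0,1,2 is the concatenation of the three key-buckets
theorem pvSorted_three {α : Type} (key : α → Int) (xs : List α)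
    (h : ∀ x ∈ xs, key x = 0 ∨ key x = 1 ∨ key x = 2) :
    PySem.List.sorted xs key false =
      xs.filter (fun x => decide (key x = 0)) ++ xs.filter (fun x => decide (key x = 1)) ++ xs.filter (fun x => decide (key x = 2)) := by
  induction xs using List.reverseRecOn with
  | nil => rfl
  | append_singleton ys x ih =>
    have hstep : PySem.List.sorted (ys ++ [x]) key false =
        PySem.List.insertBy (fun a b => decide (key a < key b)) x (PySem.List.sorted ys key false) := by
      rw [PySem.List.sorted_eq_foldl_insertBy, List.foldl_append, ← PySem.List.sorted_eq_foldl_insertBy]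
      rfl
    have hy : ∀ y ∈ ys, key y = 0 ∨ key y = 1 ∨ key y = 2 :=
      fun y hy => h y (List.mem_append_left _ hy)
    have k0 : ∀ y ∈ ys.filter (fun x => decide (key x = 0)), key y = 0 := by
      intro y hm; simpa using (List.mem_filter.mp hm).2
    have k1 : ∀ y ∈ ys.filter (fun x => decide (key x = 1)), key y = 1 := by
      intro y hm; simpa using (List.mem_filter.mp hm).2
    have k2 : ∀ y ∈ ys.filter (fun x => decide (key x = 2)), key y = 2 := by
      intro y hm; simpa using (List.mem_filter.mp hm).2
    rw [hstep, ih hy]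
    rcases h x (List.mem_append_right _ (List.mem_cons_self ..)) with hk | hk | hk
    · have e1 := pvInsertBy_append_not (fun a b => decide (key a < key b)) x
        (ys.filter (fun x => decide (key x = 0)))
        (ys.filter (fun x => decide (key x = 1)) ++ ys.filter (fun x => decide (key x = 2)))
        (by intro y hm; simp [hk, k0 y hm])
      have e2 := pvInsertBy_all_before (fun a b => decide (key a < key b)) x
        (ys.filter (fun x => decide (key x = 1)) ++ ys.filter (fun x => decide (key x = 2)))
        (by
          intro y hm
          rcases List.mem_append.mp hm with hm | hm
          · simp [hk, k1 y hm]
          · simp [hk, k2 y hm])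
      rw [List.append_assoc, e1, e2]
      simp [List.filter_append, hk]
    · have e1 := pvInsertBy_append_not (fun a b => decide (key a < key b)) x
        (ys.filter (fun x => decide (key x = 0)))
        (ys.filter (fun x => decide (key x = 1)) ++ ys.filter (fun x => decide (key x = 2)))
        (by intro y hm; simp [hk, k0 y hm])
      have e2 := pvInsertBy_append_not (fun a b => decide (key a < key b)) x
        (ys.filter (fun x => decide (key x = 1)))
        (ys.filter (fun x => decide (key x = 2)))
        (by intro y hm; simp [hk, k1 y hm])
      have e3 := pvInsertBy_all_before (fun a b => decide (key a < key b)) x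
        (ys.filter (fun x => decide (key x = 2)))
        (by intro y hm; simp [hk, k2 y hm])
      rw [List.append_assoc, e1, e2, e3]
      simp [List.filter_append, hk]
    · have e1 := pvInsertBy_append_not (fun a b => decide (key a < key b)) x
        (ys.filter (fun x => decide (key x = 0)))
        (ys.filter (fun x => decide (key x = 1)) ++ ys.filter (fun x => decide (key x = 2)))
        (by intro y hm; simp [hk, k0 y hm])
      have e2 := pvInsertBy_append_not (fun a b => decide (key a < key b)) x
        (ys.filter (fun x => decide (key x = 1)))
        (ys.filter (fun x => decide (key x = 2)))
        (by intro y hm; simp [hk, k1 y hm])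
      have e3 := PySem.List.insertBy_of_forall_not_before (fun a b => decide (key a < key b)) x
        (ys.filter (fun x => decide (key x = 2)))
        (by intro y hm; simp [hk, k2 y hm])
      rw [List.append_assoc, e1, e2, e3]
      simp [List.filter_append, hk]

-- A's filtering loop builds the filter of the pipeline
theorem pvNeeded_eq (pipeline : List (List (String × String))) (acc : List (List (String × String))) :
    pipeline.foldl (fun acc entry => if pvStatusDone entry then acc else acc ++ [entry]) acc =
      acc ++ pipeline.filter (fun e => !pvStatusDone e) := by
  have hfun : (fun (acc : List (List (String × String))) (x : List (String × String)) =>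
      if (!pvStatusDone x) = true then acc ++ [id x] else acc) =
      (fun acc entry => if pvStatusDone entry then acc else acc ++ [entry]) := by
    funext a x; cases hx : pvStatusDone x <;> simp
  rw [← hfun, PySem.List.foldl_append_if]
  simp

-- B's bucket loop builds the three key-buckets of the filtered pipeline
theorem pvBuckets_eq (pipeline : List (List (String × String)))
    (h m l : List (List (String × String))) :
    pipeline.foldl pvBucketStep (h, m, l) =
      (h ++ (pipeline.filter (fun e => !pvStatusDone e)).filter (fun x => decide (pvPrioKey x = 0)),
       m ++ (pipeline.filter (fun e => !pvStatusDone e)).filter (fun x => decide (pvPrioKey x = 1)),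
       l ++ (pipeline.filter (fun e => !pvStatusDone e)).filter (fun x => decide (pvPrioKey x = 2))) := by
  induction pipeline generalizing h m l with
  | nil => simp
  | cons e es ih =>
    simp only [List.foldl_cons]
    by_cases hs : pvStatusDone e
    · simp [pvBucketStep, hs, ih]
    · rcases pvPrioKey_cases e with hk | hk | hk <;>
        simp [pvBucketStep, hs, hk, ih]

-- ===== VERDICT (by name: the statement is the Claim_ definition above) =====
theorem extract_next_blogs_py_spec : Claim_equal_extract_next_blogs_py := by
  intro roadmap_data limit _
  unfold Spec_extract_next_blogs_py extract_next_blogs_py extract_next_blogs_py_alt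
  by_cases h0 : roadmap_data = []
  · simp [h0]
  · simp only [h0, if_false]
    cases hf : (roadmap_data.find? (fun p => p.1 == "blogs_pipeline")).map (·.2) with
    | none => rfl
    | some pipeline =>
      by_cases hp : pipeline = []
      · simp [hp]
      · simp only [hp, if_false]
        rw [pvNeeded_eq, pvBuckets_eq, List.nil_append,
          pvSorted_three pvPrioKey _ (fun x _ => pvPrioKey_cases x)]
        simp
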